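-- pv_equiv track=rewrite | github.com/VishibSlathia/Search-Summarize-and-rewrite | test.py | parse_markdown_text
-- ===== SOURCE A (Python) =====
-- def parse_markdown_text(markdown):
--     output = []
--     current_heading = None
--     current_body = ""
--
--     for line in markdown.split('\n'):
--         if line.startswith("## "):
--             if current_heading:
--                 output.append({"heading": current_heading, "text": current_body.strip()})
--             current_heading = line
--             current_body = ""
--         else:
--             current_body += line.strip() + " "
--
--     if current_heading:
--         output.append({"heading": current_heading, "text": current_body.strip()})
--
--     return output
-- ===== SOURCE B (Python) =====
-- def parse_markdown_text(markdown):
--     # Two-pass index approach: find all heading line indices first, then slice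
--     # out each section's body between consecutive headings.
--     lines = markdown.split('\n')
--     starts = [i for i, line in enumerate(lines) if line.startswith('## ')]
--     ends = starts[1:] + [len(lines)]
--     return [{'heading': lines[i],
--              'text': ' '.join(x.strip() for x in lines[i + 1:e]).strip()}
--             for i, e in zip(starts, ends)]
-- ===== Notes on version B (the rewrite author's own statement) =====
-- stated objective: alternative
-- what changed: Replaces A's single-pass accumulator loop (pending heading + growing body string with flush-on-next-heading and a duplicated flush after the loop) by a two-pass index computation: collect the indices of all heading lines, pair each with the next heading index (or the line count), and build each section by slicing and joining the stripped body lines.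
import Mathlib
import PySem

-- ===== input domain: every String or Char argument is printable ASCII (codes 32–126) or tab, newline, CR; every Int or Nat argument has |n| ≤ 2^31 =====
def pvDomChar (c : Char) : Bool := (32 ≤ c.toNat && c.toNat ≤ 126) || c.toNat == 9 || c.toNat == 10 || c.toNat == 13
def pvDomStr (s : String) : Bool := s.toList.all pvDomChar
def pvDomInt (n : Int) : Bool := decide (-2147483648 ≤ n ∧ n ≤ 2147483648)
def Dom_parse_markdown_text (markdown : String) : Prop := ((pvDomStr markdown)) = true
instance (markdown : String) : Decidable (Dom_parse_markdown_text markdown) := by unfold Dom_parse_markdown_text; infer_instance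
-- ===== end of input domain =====

-- B replaces A's single-pass accumulator/flush loop with a two-pass heading-index
-- computation (alternative decomposition, same O(n) cost).

-- ===== PORT A =====
-- One step of A's for-loop; state = (output, current_heading, current_body).
-- `if current_heading:` tests Python truthiness: current_heading is either None or a
-- line starting with "## " (hence nonempty, truthy), so the Option match is exact.
def pvStepA (st : List (List (String × String)) × Option String × String) (line : String) :
    List (List (String × String)) × Option String × String :=
  if PySem.Str.startswith line "## " then
    ((match st.2.1 with
      | some h => st.1 ++ [[("heading", h), ("text", PySem.Str.strip st.2.2)]]
      | none => st.1), some line, "")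
  else
    (st.1, st.2.1, st.2.2 ++ PySem.Str.strip line ++ " ")

def parse_markdown_text (markdown : String) : List (List (String × String)) :=
  -- sep "\n" is nonempty, so split? is always some
  let st := ((PySem.Str.split? markdown "\n").getD []).foldl pvStepA ([], none, "")
  match st.2.1 with
  | some h => st.1 ++ [[("heading", h), ("text", PySem.Str.strip st.2.2)]]
  | none => st.1

-- ===== PORT B =====
def parse_markdown_text_alt (markdown : String) : List (List (String × String)) :=
  let lines := (PySem.Str.split? markdown "\n").getD []   -- sep "\n" ≠ "", always some
  let starts := ((PySem.List.enumerate lines).filter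
      (fun p => PySem.Str.startswith p.2 "## ")).map (fun p => p.1)
  let ends := PySem.List.slice starts (some 1) none ++ [(lines.length : Int)]
  (starts.zip ends).map (fun p =>
    [("heading", PySem.List.pyGetD lines p.1 ""),   -- p.1 is a valid index (from enumerate)
     ("text", PySem.Str.strip (PySem.Str.join " "
        ((PySem.List.slice lines (some (p.1 + 1)) (some p.2)).map
          (fun x => PySem.Str.strip x))))])

-- ===== PRECONDITION & SPEC =====
def Spec_parse_markdown_text (markdown : String) (out : List (List (String × String))) : Prop := out = parse_markdown_text_alt markdown
instance (markdown : String) (out : List (List (String × String))) : Decidable (Spec_parse_markdown_text markdown out) := by unfold Spec_parse_markdown_text; infer_instance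

-- ===== CLAIM (what is proved, stated in full; the proofs are below) =====
def Claim_equal_parse_markdown_text : Prop := ∀ (markdown : String), Dom_parse_markdown_text markdown → Spec_parse_markdown_text markdown (parse_markdown_text markdown)

-- ===== LEMMAS AND PROOFS =====

def pvIsH (l : String) : Bool := PySem.Str.startswith l "## "

def pvBody (xs : List String) : String :=
  PySem.Str.strip (PySem.Str.join " " (xs.map PySem.Str.strip))

def pvSec (h : String) (xs : List String) : List (String × String) :=
  [("heading", h), ("text", pvBody xs)]

-- the common reference: recursion on heading-delimited spans
def pvSpan : List String → List (List (String × String))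
  | [] => []
  | l :: ls =>
    if pvIsH l then
      pvSec l (ls.takeWhile (fun x => !pvIsH x)) :: pvSpan (ls.dropWhile (fun x => !pvIsH x))
    else pvSpan ls
termination_by xs => xs.length
decreasing_by
  · simpa using Nat.lt_succ_of_le (List.length_dropWhile_le _ _)
  · simp

-- Nat-level heading indices
def pvStartsN : List String → List Nat
  | [] => []
  | l :: ls => if pvIsH l then 0 :: (pvStartsN ls).map (· + 1) else (pvStartsN ls).map (· + 1)

-- Nat-level section builder matching B
def pvSections (lines : List String) (pairs : List (Nat × Nat)) : List (List (String × String)) :=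
  pairs.map (fun p => pvSec (lines.getD p.1 "") ((lines.drop (p.1 + 1)).take (p.2 - (p.1 + 1))))

theorem pvSpan_dropWhile (ls : List String) :
    pvSpan (ls.dropWhile (fun x => !pvIsH x)) = pvSpan ls := by
  induction ls with
  | nil => rfl
  | cons l ls ih =>
    by_cases h : pvIsH l
    · simp [h]
    · simp only [List.dropWhile_cons, h]
      simp only [Bool.not_false, if_true, ih]
      simp [pvSpan, h]

theorem pvTake_headD (ls : List String) :
    ls.take ((pvStartsN ls).headD ls.length) = ls.takeWhile (fun x => !pvIsH x) := by
  induction ls with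
  | nil => rfl
  | cons l ls ih =>
    by_cases h : pvIsH l
    · simp [pvStartsN, h]
    · simp only [pvStartsN, h, List.takeWhile_cons, Bool.not_eq_true']
      cases hs : pvStartsN ls with
      | nil => simp [hs, List.take_succ_cons] at ih ⊢; simpa [hs] using ih
      | cons x t => simp [hs, List.take_succ_cons] at ih ⊢; simpa [hs] using ih

theorem pvSections_shift (l : String) (ls : List String) (pairs : List (Nat × Nat)) :
    pvSections (l :: ls) (pairs.map (fun p => (p.1 + 1, p.2 + 1))) = pvSections ls pairs := by
  unfold pvSections
  rw [List.map_map]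
  apply List.map_congr_left
  intro p _
  simp only [Function.comp_apply]
  have h1 : (l :: ls).getD (p.1 + 1) "" = ls.getD p.1 "" := List.getD_cons_succ
  have h2 : ((l :: ls).drop (p.1 + 1 + 1)).take (p.2 + 1 - (p.1 + 1 + 1))
      = (ls.drop (p.1 + 1)).take (p.2 - (p.1 + 1)) := by
    simp only [List.drop_succ_cons]
    congr 1
    omega
  rw [h1, h2]

theorem pvZipShift (S : List Nat) (n : Nat) :
    (S.map (· + 1)).zip ((S.drop 1 ++ [n]).map (· + 1))
      = (S.zip (S.drop 1 ++ [n])).map (fun p => (p.1 + 1, p.2 + 1)) := by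
  rw [List.zip_map]
  apply List.map_congr_left
  intro p _
  rfl

theorem pvSections_cons (lines : List String) (p : Nat × Nat) (ps : List (Nat × Nat)) :
    pvSections lines (p :: ps)
      = pvSec (lines.getD p.1 "") ((lines.drop (p.1 + 1)).take (p.2 - (p.1 + 1)))
        :: pvSections lines ps := rfl

theorem pvB_main (ls : List String) :
    pvSections ls ((pvStartsN ls).zip ((pvStartsN ls).drop 1 ++ [ls.length])) = pvSpan ls := by
  induction ls with
  | nil => simp [pvSections, pvSpan, pvStartsN]
  | cons l ls ih =>
    by_cases h : pvIsH l
    · rw [show pvSpan (l :: ls) = pvSec l (ls.takeWhile (fun x => !pvIsH x)) ::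
            pvSpan (ls.dropWhile (fun x => !pvIsH x)) by simp [pvSpan, h]]
      rw [pvSpan_dropWhile]
      cases hs : pvStartsN ls with
      | nil =>
        have hnil : pvSpan ls = [] := by
          rw [← ih]; simp [hs, pvSections]
        have htw : ls.takeWhile (fun x => !pvIsH x) = ls := by
          rw [← pvTake_headD ls, hs]
          simp
        simp only [pvStartsN, h, if_true, hs]
        simp only [List.map_nil, List.drop_succ_cons, List.drop_nil, List.nil_append,
          List.length_cons, List.zip_cons_cons, List.zip_nil_right]
        rw [hnil, htw]
        unfold pvSections
        simp only [List.map_cons, List.map_nil]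
        congr 2
        simp
      | cons x t =>
        have htw : ls.takeWhile (fun x => !pvIsH x) = ls.take x := by
          rw [← pvTake_headD ls, hs]
          rfl
        simp only [pvStartsN, h, if_true, hs, List.map_cons, List.drop_succ_cons,
          List.drop_zero, List.length_cons]
        have hrest : (t.map (· + 1)) ++ [ls.length + 1]
            = ((x :: t).drop 1 ++ [ls.length]).map (· + 1) := by simp
        rw [show ((x + 1) :: t.map (· + 1)) ++ [ls.length + 1]
              = (x + 1) :: ((t.map (· + 1)) ++ [ls.length + 1]) by simp]
        rw [List.zip_cons_cons, hrest,
          show (x + 1) :: t.map (· + 1) = (x :: t).map (· + 1) by simp,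
          pvZipShift, pvSections_cons, pvSections_shift, ← hs, ih, htw]
        congr 2
    · simp only [pvStartsN, h, Bool.false_eq_true, if_false]
      rw [show pvSpan (l :: ls) = pvSpan ls by simp [pvSpan, h]]
      rw [← ih]
      rw [show ((pvStartsN ls).map (· + 1)).drop 1 ++ [(l :: ls).length]
            = ((pvStartsN ls).drop 1 ++ [ls.length]).map (· + 1) by simp]
      rw [pvZipShift]
      exact pvSections_shift l ls _


-- ---- string lemmas: A's "strip-and-append-space" accumulation vs " ".join ----

-- A's body accumulation over a list of body lines, starting from b
def pvAcc (b : String) (xs : List String) : String :=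
  xs.foldl (fun b l => b ++ PySem.Str.strip l ++ " ") b

theorem pvStrip_append_space (s : List Char) :
    PySem.Chars.strip (s ++ [' ']) = PySem.Chars.strip s := by
  unfold PySem.Chars.strip PySem.Chars.lstrip
  rw [List.dropWhile_append]
  by_cases he : (List.dropWhile PySem.Chars.isspace s).isEmpty = true
  · rw [if_pos he]
    rw [List.isEmpty_iff.mp he]
    have : List.dropWhile PySem.Chars.isspace [' '] = [] := by decide
    rw [this]
  · rw [if_neg he]
    unfold PySem.Chars.rstrip
    rw [List.reverse_append]
    have : ([' '] : List Char).reverse = [' '] := rfl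
    rw [this]
    have hsp : PySem.Chars.isspace ' ' = true := by decide
    rw [List.singleton_append, List.dropWhile_cons, hsp, if_pos rfl]

theorem pvFlatten_space (y : List Char) (ys : List (List Char)) :
    ((y :: ys).map (· ++ [' '])).flatten = PySem.Chars.join [' '] (y :: ys) ++ [' '] := by
  induction ys generalizing y with
  | nil => simp [PySem.Chars.join_singleton]
  | cons z zs ih =>
    rw [List.map_cons, List.flatten_cons, ih z, PySem.Chars.join_cons_cons]
    simp

theorem pvStrip_flatten (ys : List (List Char)) :
    PySem.Chars.strip ((ys.map (· ++ [' '])).flatten)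
      = PySem.Chars.strip (PySem.Chars.join [' '] ys) := by
  cases ys with
  | nil => rfl
  | cons y ys => rw [pvFlatten_space, pvStrip_append_space]

theorem pvAcc_toList (xs : List String) (b : String) :
    (pvAcc b xs).toList
      = b.toList ++ ((xs.map (fun l => PySem.Chars.strip l.toList ++ [' '])).flatten) := by
  induction xs generalizing b with
  | nil => simp [pvAcc]
  | cons l ls ih =>
    unfold pvAcc at ih ⊢
    rw [List.foldl_cons, ih]
    simp [PySem.Str.toList_strip]

-- A's accumulated body, stripped, equals B's " ".join of stripped lines, stripped
theorem pvAcc_strip (xs : List String) :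
    PySem.Str.strip (pvAcc "" xs) = pvBody xs := by
  unfold PySem.Str.strip pvBody
  apply congrArg String.ofList
  rw [pvAcc_toList]
  have h0 : ("" : String).toList = [] := rfl
  rw [h0, List.nil_append]
  rw [show (xs.map (fun l => PySem.Chars.strip l.toList ++ [' ']))
        = (xs.map (fun l => PySem.Chars.strip l.toList)).map (· ++ [' ']) by
      rw [List.map_map]; apply List.map_congr_left; intro a _; rfl]
  rw [pvStrip_flatten]
  congr 1
  rw [PySem.Str.toList_join]
  congr 1
  rw [List.map_map]
  apply List.map_congr_left
  intro l _
  simp only [Function.comp_apply]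
  exact (PySem.Str.toList_strip l).symm

-- ---- A's loop equals pvSpan ----

-- the flush after A's loop
def pvFin (st : List (List (String × String)) × Option String × String) :
    List (List (String × String)) :=
  match st.2.1 with
  | some h => st.1 ++ [[("heading", h), ("text", PySem.Str.strip st.2.2)]]
  | none => st.1

theorem pvA_some (ls : List String) :
    ∀ (acc : List (List (String × String))) (h : String) (b : String),
    pvFin (ls.foldl pvStepA (acc, some h, b))
      = acc ++ [("heading", h), ("text", PySem.Str.strip (pvAcc b (ls.takeWhile (fun x => !pvIsH x))))]
          :: pvSpan (ls.dropWhile (fun x => !pvIsH x)) := by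
  induction ls with
  | nil => intro acc h b; simp [pvFin, pvAcc, pvSpan]
  | cons l ls ih =>
    intro acc h b
    by_cases hl : pvIsH l
    · rw [List.foldl_cons]
      rw [show pvStepA (acc, some h, b) l
            = (acc ++ [[("heading", h), ("text", PySem.Str.strip b)]], some l, "") by
          unfold pvStepA
          simp only [show PySem.Str.startswith l "## " = true from hl, if_true]]
      rw [ih]
      simp only [List.takeWhile_cons, List.dropWhile_cons, hl, Bool.not_true,
        Bool.false_eq_true, if_false]
      rw [pvAcc_strip]
      rw [show pvSpan (l :: ls)
            = pvSec l (ls.takeWhile (fun x => !pvIsH x))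
                :: pvSpan (ls.dropWhile (fun x => !pvIsH x)) by simp [pvSpan, hl]]
      simp [pvSec, pvAcc]
    · rw [List.foldl_cons]
      rw [show pvStepA (acc, some h, b) l
            = (acc, some h, b ++ PySem.Str.strip l ++ " ") by
          unfold pvStepA
          simp only [show PySem.Str.startswith l "## " = false from (by simpa [pvIsH] using hl),
            Bool.false_eq_true, if_false]]
      rw [ih]
      simp only [List.takeWhile_cons, List.dropWhile_cons, hl, Bool.not_false, if_true]
      rw [show pvAcc b (l :: ls.takeWhile (fun x => !pvIsH x))
            = pvAcc (b ++ PySem.Str.strip l ++ " ") (ls.takeWhile (fun x => !pvIsH x)) by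
          simp [pvAcc]]

theorem pvA_none (ls : List String) :
    ∀ (acc : List (List (String × String))) (b : String),
    pvFin (ls.foldl pvStepA (acc, none, b)) = acc ++ pvSpan ls := by
  induction ls with
  | nil => intro acc b; simp [pvFin, pvSpan]
  | cons l ls ih =>
    intro acc b
    by_cases hl : pvIsH l
    · rw [List.foldl_cons]
      rw [show pvStepA (acc, none, b) l = (acc, some l, "") by
          unfold pvStepA
          simp only [show PySem.Str.startswith l "## " = true from hl, if_true]]
      rw [pvA_some ls acc l "", pvAcc_strip]
      rw [show pvSpan (l :: ls)
            = pvSec l (ls.takeWhile (fun x => !pvIsH x))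
                :: pvSpan (ls.dropWhile (fun x => !pvIsH x)) by simp [pvSpan, hl]]
      rfl
    · rw [List.foldl_cons]
      rw [show pvStepA (acc, none, b) l = (acc, none, b ++ PySem.Str.strip l ++ " ") by
          unfold pvStepA
          simp only [show PySem.Str.startswith l "## " = false from (by simpa [pvIsH] using hl),
            Bool.false_eq_true, if_false]]
      rw [ih]
      rw [show pvSpan (l :: ls) = pvSpan ls by simp [pvSpan, hl]]

-- ---- B's port equals the Nat-level pvSections form ----

theorem pvEnum_starts (ls : List String) :
    ∀ (s : Int),
    ((PySem.List.enumerate ls s).filter (fun p => PySem.Str.startswith p.2 "## ")).map (fun p => p.1)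
      = (pvStartsN ls).map (fun (k : Nat) => (k : Int) + s) := by
  induction ls with
  | nil => intro s; rfl
  | cons l ls ih =>
    intro s
    rw [PySem.List.enumerate_cons, List.filter_cons]
    by_cases hl : pvIsH l
    · rw [if_pos (show (fun p : Int × String => PySem.Str.startswith p.2 "## ") (s, l) = true from hl)]
      rw [List.map_cons, ih (s + 1)]
      rw [show pvStartsN (l :: ls) = 0 :: (pvStartsN ls).map (· + 1) by simp [pvStartsN, hl]]
      rw [List.map_cons, List.map_map]
      congr 1
      · simp
      · apply List.map_congr_left
        intro k _
        simp only [Function.comp_apply]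
        push_cast
        ring
    · rw [if_neg (show ¬ (fun p : Int × String => PySem.Str.startswith p.2 "## ") (s, l) = true from
        by simpa [pvIsH] using hl)]
      rw [ih (s + 1)]
      rw [show pvStartsN (l :: ls) = (pvStartsN ls).map (· + 1) by simp [pvStartsN, hl]]
      rw [List.map_map]
      apply List.map_congr_left
      intro k _
      simp only [Function.comp_apply]
      push_cast
      ring

theorem pvBalt_sections (lines : List String) :
    (let starts := ((PySem.List.enumerate lines).filter
        (fun p => PySem.Str.startswith p.2 "## ")).map (fun p => p.1)
     let ends := PySem.List.slice starts (some 1) none ++ [(lines.length : Int)]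
     (starts.zip ends).map (fun p =>
       [("heading", PySem.List.pyGetD lines p.1 ""),
        ("text", PySem.Str.strip (PySem.Str.join " "
           ((PySem.List.slice lines (some (p.1 + 1)) (some p.2)).map
             (fun x => PySem.Str.strip x))))]))
      = pvSections lines ((pvStartsN lines).zip ((pvStartsN lines).drop 1 ++ [lines.length])) := by
  have hstarts : ((PySem.List.enumerate lines).filter
        (fun p => PySem.Str.startswith p.2 "## ")).map (fun p => p.1)
      = (pvStartsN lines).map (fun (k : Nat) => (k : Int)) := by
    rw [pvEnum_starts lines 0]
    apply List.map_congr_left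
    intro k _
    omega
  simp only
  rw [hstarts]
  rw [PySem.List.slice_from _ (by norm_num : (0:Int) ≤ 1)]
  rw [show ((1:Int).toNat) = 1 from rfl]
  rw [← List.map_drop]
  rw [show ([(lines.length : Int)]) = ([lines.length].map (fun (k : Nat) => (k : Int))) by simp]
  rw [← List.map_append, List.zip_map]
  unfold pvSections
  rw [List.map_map]
  apply List.map_congr_left
  intro p _
  simp only [Function.comp_apply, Prod.map_fst, Prod.map_snd]
  rw [PySem.List.pyGetD_natCast]
  rw [show ((p.1 : Int) + 1) = ((p.1 + 1 : Nat) : Int) by push_cast; ring]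
  rw [PySem.List.slice_natCast]
  rfl

-- ===== VERDICT (by name: the statement is the Claim_ definition above) =====
theorem parse_markdown_text_spec : Claim_equal_parse_markdown_text := by
  intro markdown _
  unfold Spec_parse_markdown_text
  have hA : parse_markdown_text markdown
      = pvFin (((PySem.Str.split? markdown "\n").getD []).foldl pvStepA ([], none, "")) := rfl
  have hB : parse_markdown_text_alt markdown
      = pvSections ((PySem.Str.split? markdown "\n").getD [])
          ((pvStartsN ((PySem.Str.split? markdown "\n").getD [])).zip
            ((pvStartsN ((PySem.Str.split? markdown "\n").getD [])).drop 1
              ++ [((PySem.Str.split? markdown "\n").getD []).length])) :=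
    pvBalt_sections _
  rw [hA, hB, pvA_none, pvB_main, List.nil_append]
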